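-- pv_equiv track=rewrite | github.com/nhukhang08/Source | Exercise/main.py | MATKHAU
-- ===== SOURCE A (Python) =====
-- def MATKHAU(s: str): # https://ucode.vn/problems/bai-20-mat-khau-159020
--     """
--     Cho một xâu s, hãy kiểm tra có bao nhiêu mật khẩu liên tiếp từ s là mật khẩu mạnh:
--         Có chữ thường
--         Có chữ hoa
--         Có số
--         Chiều dài từ 6 trở đi
--
--     Ý tưởng:
--         Dùng 2 con trỏ để tạo ra các chuỗi liên tiếp:
--             Kiểm tra chuỗi có phải mật khẩu mạnh hay không:
--                 Đúng
--                 {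
--                 Biến đếm +1
--                 Nếu mật khẩu hiện tại đã đúng, toàn bộ mật khẩu sau sẽ đúng:
--                 Biến đếm + (len(s) - vị trí hiện tại)
--                 Kết thúc kiểm tra con trỏ thứ 2, -> Tiếp tục kiểm tra con trỏ thứ 1 (i+1)
--                 }
--         In kết quả
--     """
--     def strongPassword(s: str):
--         a, A, n = False, False, False
--
--         if len(s) >= 6:
--             for char in s:
--                 if ord(char) in range(97, 123):
--                     a = True
--                 elif ord(char) in range(65, 91):
--                     A = True
--                 elif ord(char) in range(48, 58):
--                     n = True
--         if a and A and n:
--             return True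
--         return False
--     count = 0
--     for i in range(len(s)):
--         for j in range(i + 6, len(s) + 1):
--             if strongPassword(s[i:j]):
--                 count += 1
--                 count += len(s) - j
--                 break
--     return count
-- ===== SOURCE B (Python) =====
-- def MATKHAU(s: str):
--     # Per start i: one incremental scan with category flags finds the earliest end e
--     # where all three categories are present; then every j >= max(i+6, e) is strong,
--     # so the count for this start is n + 1 - max(i + 6, e) (no substring re-scans).
--     n = len(s)
--     count = 0
--     for i in range(n):
--         a = A = d = False
--         for p in range(i, n):
--             o = ord(s[p])
--             a = a or 97 <= o < 123
--             A = A or 65 <= o < 91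
--             d = d or 48 <= o < 58
--             if a and A and d:
--                 if i + 6 <= n:
--                     count += n + 1 - max(i + 6, p + 1)
--                 break
--     return count
-- ===== Notes on version B (the rewrite author's own statement) =====
-- stated objective: faster
-- what changed: B replaces A's per-start inner loop over all end positions (each re-scanning the whole substring via strongPassword) by a single incremental flag scan per start that finds the earliest all-categories end e and counts n+1-max(i+6,e) in closed form.
import Mathlib
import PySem

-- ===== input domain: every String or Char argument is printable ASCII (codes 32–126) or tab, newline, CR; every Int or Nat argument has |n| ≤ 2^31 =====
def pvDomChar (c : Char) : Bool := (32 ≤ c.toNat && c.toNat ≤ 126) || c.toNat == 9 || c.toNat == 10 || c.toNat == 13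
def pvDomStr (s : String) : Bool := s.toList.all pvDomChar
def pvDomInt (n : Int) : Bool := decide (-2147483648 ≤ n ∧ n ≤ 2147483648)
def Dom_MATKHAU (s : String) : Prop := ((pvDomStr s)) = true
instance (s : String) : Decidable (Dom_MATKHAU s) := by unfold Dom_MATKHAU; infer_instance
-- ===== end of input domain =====

-- B replaces A's per-start scan over all end positions (each re-checking the substring)
-- by one incremental flag scan per start and a closed-form count; objective: faster (asymptotic).


-- ===== PORT A =====
-- one step of strongPassword's for-loop (the if/elif chain over ord ranges)
def stepA (st : Bool × Bool × Bool) (c : Char) : Bool × Bool × Bool :=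
  if 97 ≤ c.toNat ∧ c.toNat < 123 then (true, st.2.1, st.2.2)
  else if 65 ≤ c.toNat ∧ c.toNat < 91 then (st.1, true, st.2.2)
  else if 48 ≤ c.toNat ∧ c.toNat < 58 then (st.1, st.2.1, true)
  else st

-- strongPassword(s): flags start False, the loop runs only if len >= 6
def strongA (l : List Char) : Bool :=
  let st := if 6 ≤ l.length then l.foldl stepA (false, false, false) else (false, false, false)
  st.1 && st.2.1 && st.2.2

-- inner 'for j in range(i+6, n+1)' with break; s[i:j] = (drop i).take (j-i),
-- exact here since 0 ≤ i ≤ j (natural in-range slice bounds)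
def innerA (cs : List Char) (n i : Nat) : List Nat → Int
  | [] => 0
  | j :: js =>
    if strongA ((cs.drop i).take (j - i)) then 1 + ((n : Int) - (j : Int))
    else innerA cs n i js

def MATKHAU (s : String) : Int :=
  let cs := s.toList
  let n := cs.length
  -- range(len(s)) and range(i+6, len(s)+1): Nat ranges, exact for these nonnegative bounds
  (List.range n).foldl (fun count i => count + innerA cs n i (List.range' (i + 6) (n + 1 - (i + 6)))) 0

-- ===== PORT B =====
-- inner 'for p in range(i, n)' of Source B: flags or-ed in incrementally, first all-true position
def scanB (p : Nat) (a A d : Bool) : List Char → Option Nat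
  | [] => none
  | c :: rest =>
    let a' := a || (97 ≤ c.toNat && c.toNat < 123)
    let A' := A || (65 ≤ c.toNat && c.toNat < 91)
    let d' := d || (48 ≤ c.toNat && c.toNat < 58)
    if a' && A' && d' then some (p + 1) else scanB (p + 1) a' A' d' rest

def MATKHAU_alt (s : String) : Int :=
  let cs := s.toList
  let n := cs.length
  (List.range n).foldl (fun count i =>
    match scanB i false false false (cs.drop i) with
    | some e => if i + 6 ≤ n then count + ((n : Int) + 1 - (max (i + 6) e : Nat)) else count
    | none => count) 0

-- ===== PRECONDITION & SPEC =====
def Spec_MATKHAU (s : String) (out : Int) : Prop := out = MATKHAU_alt s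
instance (s : String) (out : Int) : Decidable (Spec_MATKHAU s out) := by unfold Spec_MATKHAU; infer_instance

-- ===== CLAIM (what is proved, stated in full; the proofs are below) =====
def Claim_equal_MATKHAU : Prop := ∀ (s : String), Dom_MATKHAU s → Spec_MATKHAU s (MATKHAU s)

-- ===== LEMMAS AND PROOFS =====

-- monotone or-step used by B (pointwise equal to A's if/elif step)
def stepO (st : Bool × Bool × Bool) (c : Char) : Bool × Bool × Bool :=
  (st.1 || (97 ≤ c.toNat && c.toNat < 123),
   st.2.1 || (65 ≤ c.toNat && c.toNat < 91),
   st.2.2 || (48 ≤ c.toNat && c.toNat < 58))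

lemma stepA_eq_stepO (st : Bool × Bool × Bool) (c : Char) : stepA st c = stepO st c := by
  obtain ⟨a, A, d⟩ := st
  simp only [stepA, stepO]
  split_ifs with h1 h2 h3 <;> simp_all <;> omega

lemma foldl_stepA_eq (l : List Char) (st : Bool × Bool × Bool) :
    l.foldl stepA st = l.foldl stepO st := by
  induction l generalizing st with
  | nil => rfl
  | cons c cs ih => simp [List.foldl, stepA_eq_stepO, ih]

def all3 (st : Bool × Bool × Bool) : Bool := st.1 && st.2.1 && st.2.2

lemma all3_foldl_mono (l : List Char) (st : Bool × Bool × Bool) (h : all3 st = true) :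
    all3 (l.foldl stepO st) = true := by
  induction l generalizing st with
  | nil => exact h
  | cons c cs ih =>
    obtain ⟨a, A, d⟩ := st
    simp only [all3, Bool.and_eq_true] at h
    obtain ⟨⟨ha, hA⟩, hd⟩ := h
    exact ih _ (by simp [all3, stepO, ha, hA, hd])

lemma scanB_none (l : List Char) (p : Nat) (a A d : Bool)
    (h0 : (a && A && d) = false)
    (h : scanB p a A d l = none) : all3 (l.foldl stepO (a, A, d)) = false := by
  induction l generalizing p a A d with
  | nil => simpa [all3] using h0
  | cons c cs ih =>
    simp only [scanB] at h
    split at h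
    · exact absurd h (by simp)
    · rename_i hsplit
      simpa [List.foldl, stepO] using ih _ _ _ _ (by simpa using hsplit) h

lemma scanB_some_bounds (l : List Char) (p : Nat) (a A d : Bool) (e : Nat)
    (h : scanB p a A d l = some e) : p + 1 ≤ e ∧ e ≤ p + l.length := by
  induction l generalizing p a A d with
  | nil => simp [scanB] at h
  | cons c cs ih =>
    simp only [scanB] at h
    split at h
    · simp_all; omega
    · have := ih _ _ _ _ h
      simp; omega

lemma scanB_some_iff (l : List Char) (p : Nat) (a A d : Bool) (e : Nat)
    (h0 : (a && A && d) = false)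
    (h : scanB p a A d l = some e) :
    ∀ k, (all3 ((l.take k).foldl stepO (a, A, d)) = true ↔ e ≤ p + k) := by
  induction l generalizing p a A d with
  | nil => simp [scanB] at h
  | cons c cs ih =>
    have hb := scanB_some_bounds (c :: cs) p a A d e h
    simp only [scanB] at h
    intro k
    cases k with
    | zero =>
      simp only [List.take_zero, List.foldl_nil]
      constructor
      · intro hk
        rw [show all3 (a, A, d) = (a && A && d) from rfl, h0] at hk
        exact absurd hk (by simp)
      · intro hk; omega
    | succ k =>
      split at h
      · rename_i hall
        injection h with he
        subst he
        simp only [List.take_succ_cons, List.foldl_cons]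
        constructor
        · intro _; omega
        · intro _
          have : all3 (stepO (a, A, d) c) = true := by
            simpa [stepO, all3] using hall
          exact all3_foldl_mono _ _ this
      · rename_i hall
        have h2 := ih _ _ _ _ (by simpa using hall) h k
        simp only [List.take_succ_cons, List.foldl_cons, stepO]
        constructor
        · intro hx; have := h2.1 hx; omega
        · intro hx; exact h2.2 (by omega)

lemma strongA_char (l : List Char) :
    strongA l = (decide (6 ≤ l.length) && all3 (l.foldl stepO (false, false, false))) := by
  simp only [strongA, foldl_stepA_eq, all3]
  split <;> simp_all

-- innerA is 0 when the condition never holds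
lemma innerA_zero (cs : List Char) (n i : Nat) (js : List Nat)
    (h : ∀ j ∈ js, strongA ((cs.drop i).take (j - i)) = false) :
    innerA cs n i js = 0 := by
  induction js with
  | nil => rfl
  | cons j js ih =>
    simp only [innerA, h j (by simp)]
    exact ih (fun j hj => h j (by simp [hj]))

-- innerA over the full tail range when the condition is 'e ≤ j'
lemma innerA_eval (cs : List Char) (n i e : Nat)
    (hcond : ∀ j, i + 6 ≤ j → j ≤ n → strongA ((cs.drop i).take (j - i)) = decide (e ≤ j)) :
    ∀ k s, i + 6 ≤ s → s + k = n + 1 → max s e ≤ n →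
      innerA cs n i (List.range' s k) = 1 + (n : Int) - (max s e : Nat) := by
  intro k
  induction k with
  | zero => intro s hs hk hm; omega
  | succ k ih =>
    intro s hs hk hm
    have hsn : s ≤ n := by omega
    simp only [List.range'_succ, innerA, hcond s hs hsn]
    by_cases he : e ≤ s
    · have : max s e = s := by omega
      simp [he]; omega
    · have hse : s < e := by omega
      have hmax : max (s + 1) e = max s e := by omega
      rw [if_neg (by simpa using he)]
      rw [ih (s + 1) (by omega) (by omega) (by omega), hmax]

-- the per-start contributions agree
lemma per_i_eq (cs : List Char) (i : Nat) (hi : i < cs.length) (count : Int) :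
    count + innerA cs cs.length i (List.range' (i + 6) (cs.length + 1 - (i + 6))) =
      (match scanB i false false false (cs.drop i) with
        | some e => if i + 6 ≤ cs.length then count + ((cs.length : Int) + 1 - (max (i + 6) e : Nat)) else count
        | none => count) := by
  set n := cs.length with hn
  cases hsc : scanB i false false false (cs.drop i) with
  | none =>
    have hflags := scanB_none _ _ _ _ _ (by simp) hsc
    have hz : innerA cs n i (List.range' (i + 6) (n + 1 - (i + 6))) = 0 := by
      apply innerA_zero
      intro j hj
      rw [strongA_char]
      by_cases hlen : 6 ≤ ((cs.drop i).take (j - i)).length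
      · have : all3 (((cs.drop i).take (j - i)).foldl stepO (false, false, false)) = false := by
          by_contra hc
          simp only [Bool.not_eq_false] at hc
          have : all3 ((((cs.drop i).take (j - i)) ++ ((cs.drop i).drop (j - i))).foldl stepO (false, false, false)) = true := by
            rw [List.foldl_append]; exact all3_foldl_mono _ _ hc
          rw [List.take_append_drop] at this
          rw [hflags] at this; exact absurd this (by simp)
        simp [this]
      · rw [decide_eq_false hlen, Bool.false_and]
    have hz' : innerA cs n i (List.range' (i + 6) (n - (i + 5))) = 0 := by
      simpa [show n + 1 - (i + 6) = n - (i + 5) from by omega] using hz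
    simp [hz']
  | some e =>
    have hb := scanB_some_bounds _ _ _ _ _ _ hsc
    have hlen : (cs.drop i).length = n - i := by simp [hn]
    have he_le : e ≤ n := by omega
    have hiff := scanB_some_iff _ _ _ _ _ _ (by simp) hsc
    have hcond : ∀ j, i + 6 ≤ j → j ≤ n → strongA ((cs.drop i).take (j - i)) = decide (e ≤ j) := by
      intro j hj hjn
      rw [strongA_char]
      have hlent : ((cs.drop i).take (j - i)).length = j - i := by
        simp [hlen]; omega
      have h6 : 6 ≤ ((cs.drop i).take (j - i)).length := by omega
      have := hiff (j - i)
      have hei : (e ≤ i + (j - i)) ↔ (e ≤ j) := by omega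
      rw [hei] at this
      by_cases hej : e ≤ j
      · simp [this.2 hej, hej]; omega
      · have : all3 (((cs.drop i).take (j - i)).foldl stepO (false, false, false)) = false := by
          by_contra hc
          simp only [Bool.not_eq_false] at hc
          exact hej (this.1 hc)
        simp [this, hej]
    by_cases h6n : i + 6 ≤ n
    · have := innerA_eval cs n i e hcond (n + 1 - (i + 6)) (i + 6) (le_refl _) (by omega) (by omega)
      rw [this]
      simp [h6n]; ring
    · have : n + 1 - (i + 6) = 0 := by omega
      simp [this, innerA, h6n]

-- ===== VERDICT (by name: the statement is the Claim_ definition above) =====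
theorem MATKHAU_spec : Claim_equal_MATKHAU := by
  intro s _
  unfold Spec_MATKHAU MATKHAU MATKHAU_alt
  simp only
  apply PySem.List.foldl_congr_mem
  intro count i hi
  exact per_i_eq s.toList i (List.mem_range.mp hi) count
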